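-- pv_equiv track=rewrite | github.com/I1am1your1father1/Graduation-Project | mis_comparison/tabu.py | build_selected_conflict_info
-- ===== SOURCE A (Python) =====
-- def build_selected_conflict_info(in_set, adj):
--     """
--     对每个未选点，统计它与当前独立集中多少个点冲突
--     如果恰好只和一个已选点冲突，则记录这个唯一冲突点
--     """
--     n = len(adj)
--     selected_neighbor_count = [0] * n
--     unique_selected_neighbor = [-1] * n
--
--     for u, sel in enumerate(in_set):
--         if not sel:
--             continue
--         for v in adj[u]:
--             if in_set[v]:
--                 continue
--             selected_neighbor_count[v] += 1
--             if selected_neighbor_count[v] == 1: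
--                 unique_selected_neighbor[v] = u
--             else:
--                 unique_selected_neighbor[v] = -2
--
--     return selected_neighbor_count, unique_selected_neighbor
-- ===== SOURCE B (Python) =====
-- def build_selected_conflict_info(in_set, adj):
--     """
--     Different decomposition: collect the (unselected-vertex, selected-neighbor)
--     pairs first, group them into a contributors table, then derive both output
--     arrays in a separate summarizing pass.
--     """
--     n = len(adj)
--     pairs = [(v, u) for u, sel in enumerate(in_set) if sel
--                     for v in adj[u] if not in_set[v]]
--     contributors = {}
--     for v, u in pairs:
--         contributors[v] = contributors.get(v, []) + [u]
--     counts = [len(contributors.get(v, [])) for v in range(n)]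
--     unique = [contributors[v][0] if len(contributors.get(v, [])) == 1
--               else -2 if len(contributors.get(v, [])) >= 2 else -1
--               for v in range(n)]
--     return counts, unique
-- ===== Notes on version B (the rewrite author's own statement) =====
-- stated objective: alternative
-- what changed: Instead of maintaining running per-vertex counters with an inline -1/u/-2 sentinel update, B first collects the (unselected vertex, selected neighbor) pairs, groups them into a contributors table, and then derives both output arrays in a separate summarizing pass over the vertices.
-- outside the precondition, e.g. on build_selected_conflict_info([True, False], [[-1], []]): A returns ([0, 1], [-1, 0]), B returns ([0, 0], [-1, -1])
import Mathlib
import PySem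

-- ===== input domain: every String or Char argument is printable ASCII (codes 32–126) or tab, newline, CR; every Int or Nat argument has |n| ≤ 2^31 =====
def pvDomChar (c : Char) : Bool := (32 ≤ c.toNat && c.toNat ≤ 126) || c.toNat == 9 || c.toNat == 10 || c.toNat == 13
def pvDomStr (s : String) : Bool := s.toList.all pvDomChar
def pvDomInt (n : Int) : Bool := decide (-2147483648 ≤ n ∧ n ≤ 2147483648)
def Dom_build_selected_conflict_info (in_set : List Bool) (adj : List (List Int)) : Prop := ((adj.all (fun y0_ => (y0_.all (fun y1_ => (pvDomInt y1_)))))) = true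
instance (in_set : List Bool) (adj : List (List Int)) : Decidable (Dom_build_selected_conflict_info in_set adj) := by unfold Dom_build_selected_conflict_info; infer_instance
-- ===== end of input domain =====

-- B rebuilds the two arrays from a contributors (grouping) table instead of maintaining running
-- counters with an inline sentinel; objective: alternative decomposition, same asymptotic cost.
-- ===== PORT A =====
-- inner-loop body of A: one unselected neighbour v of selected u updates both arrays
def pvStepA (in_set : List Bool) (u : Int) (st : List Int × List Int) (v : Int) : List Int × List Int :=
  if PySem.List.pyGetD in_set v true then st
  else
    let c := PySem.List.pyGetD st.1 v 0 + 1
    (PySem.List.pySetD st.1 v c,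
     if c = 1 then PySem.List.pySetD st.2 v u else PySem.List.pySetD st.2 v (-2))

def build_selected_conflict_info (in_set : List Bool) (adj : List (List Int)) : List Int × List Int :=
  let n := adj.length
  (PySem.List.enumerate in_set 0).foldl
    (fun st p =>
      if p.2 = false then st
      else (PySem.List.pyGetD adj p.1 []).foldl (pvStepA in_set p.1) st)
    (List.replicate n 0, List.replicate n (-1))

-- ===== PORT B =====
-- the flattened (v, u) pair stream of B's first comprehension
def pvPairs (in_set : List Bool) (adj : List (List Int)) : List (Int × Int) :=
  (PySem.List.enumerate in_set 0).flatMap (fun p =>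
    if p.2 then
      (PySem.List.pyGetD adj p.1 []).filterMap
        (fun v => if PySem.List.pyGetD in_set v true then none else some (v, p.1))
    else [])

def build_selected_conflict_info_alt (in_set : List Bool) (adj : List (List Int)) : List Int × List Int :=
  let n := adj.length
  let contributors :=
    (pvPairs in_set adj).foldl
      (fun d q => PySem.Dict.modify d q.1 [] (· ++ [q.2])) PySem.Dict.empty
  ((PySem.List.pyRange 0 n 1).map (fun v => ((contributors.getD v []).length : Int)),
   (PySem.List.pyRange 0 n 1).map (fun v =>
      match contributors.getD v [] with
      | [] => (-1 : Int)
      | [u] => u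
      | _ => -2))

-- ===== PRECONDITION & SPEC =====
-- Pre_ excludes inputs on which A raises IndexError and inputs where A only returns thanks to
-- Python's negative-index wraparound on in_set/the output arrays, an accident of A's indexing.
def Pre_build_selected_conflict_info (in_set : List Bool) (adj : List (List Int)) : Prop :=
  ∀ u < in_set.length, in_set[u]! = true →
    u < adj.length ∧ ∀ v ∈ adj[u]!, 0 ≤ v ∧ v.toNat < in_set.length ∧
      (in_set[v.toNat]! = false → v.toNat < adj.length)
instance (in_set : List Bool) (adj : List (List Int)) : Decidable (Pre_build_selected_conflict_info in_set adj) := by unfold Pre_build_selected_conflict_info; infer_instance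

def pvWitness_build_selected_conflict_info : List Bool × List (List Int) := ([true, false], [[1], [0]])

def Spec_build_selected_conflict_info (in_set : List Bool) (adj : List (List Int)) (out : List Int × List Int) : Prop := out = build_selected_conflict_info_alt in_set adj
instance (in_set : List Bool) (adj : List (List Int)) (out : List Int × List Int) : Decidable (Spec_build_selected_conflict_info in_set adj out) := by unfold Spec_build_selected_conflict_info; infer_instance

-- ===== CLAIM (what is proved, stated in full; the proofs are below) =====
def Claim_equal_build_selected_conflict_info : Prop := ∀ (in_set : List Bool) (adj : List (List Int)), Dom_build_selected_conflict_info in_set adj → Pre_build_selected_conflict_info in_set adj → Spec_build_selected_conflict_info in_set adj (build_selected_conflict_info in_set adj)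

-- ===== LEMMAS AND PROOFS =====

-- the selected contributors of vertex v in a pair stream P
def pvContrib (P : List (Int × Int)) (v : Int) : List Int :=
  (P.filter (fun q => q.1 == v)).map (·.2)

-- the bare array update of A, without the membership test (pairs are already filtered)
def pvUpd (st : List Int × List Int) (q : Int × Int) : List Int × List Int :=
  let c := PySem.List.pyGetD st.1 q.1 0 + 1
  (PySem.List.pySetD st.1 q.1 c,
   if c = 1 then PySem.List.pySetD st.2 q.1 q.2 else PySem.List.pySetD st.2 q.1 (-2))

lemma pvStepA_eq_filterMap (in_set : List Bool) (u : Int) (vs : List Int) (st : List Int × List Int) :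
    vs.foldl (pvStepA in_set u) st
      = (vs.filterMap (fun v => if PySem.List.pyGetD in_set v true then none else some (v, u))).foldl pvUpd st := by
  induction vs generalizing st with
  | nil => rfl
  | cons v vs ih =>
      by_cases h : PySem.List.pyGetD in_set v true
      · simp [h, pvStepA, ih]
      · simp only [Bool.not_eq_true] at h
        simp [h, pvStepA, pvUpd, ih]

lemma foldl_flat (in_set : List Bool) (adj : List (List Int)) (L : List (Int × Bool)) (st : List Int × List Int) :
    L.foldl (fun st p =>
        if p.2 = false then st
        else (PySem.List.pyGetD adj p.1 []).foldl (pvStepA in_set p.1) st) st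
      = (L.flatMap (fun p =>
          if p.2 then
            (PySem.List.pyGetD adj p.1 []).filterMap
              (fun v => if PySem.List.pyGetD in_set v true then none else some (v, p.1))
          else [])).foldl pvUpd st := by
  induction L generalizing st with
  | nil => rfl
  | cons p L ih =>
      cases hb : p.2
      · simp [hb, ih, List.flatMap_cons]
      · rw [List.foldl_cons, List.flatMap_cons, List.foldl_append,
            if_neg (by simp [hb] : ¬ (p.2 = false)), if_pos hb, pvStepA_eq_filterMap]
        exact ih _

lemma set_map_range {α : Type} (n k : Nat) (f : Nat → α) (c : α) (_hk : k < n) :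
    ((List.range n).map f).set k c = (List.range n).map (fun i => if i = k then c else f i) := by
  apply List.ext_getElem
  · simp
  · intro i h1 h2
    simp only [List.getElem_set, List.getElem_map, List.getElem_range]
    simp only [List.length_set, List.length_map, List.length_range] at h1
    split_ifs with h h' h'
    · rfl
    · omega
    · omega
    · rfl

lemma pvContrib_append (P : List (Int × Int)) (q : Int × Int) (v : Int) :
    pvContrib (P ++ [q]) v = pvContrib P v ++ (if q.1 = v then [q.2] else []) := by
  simp only [pvContrib, List.filter_append, List.map_append]
  by_cases h : q.1 = v <;> simp [h]

lemma foldl_pvUpd (n : Nat) (P : List (Int × Int))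
    (hP : ∀ q ∈ P, 0 ≤ q.1 ∧ q.1.toNat < n) :
    P.foldl pvUpd (List.replicate n 0, List.replicate n (-1))
      = ((List.range n).map (fun (i : Nat) => ((pvContrib P (i : Int)).length : Int)),
         (List.range n).map (fun (i : Nat) =>
            match pvContrib P (i : Int) with
            | [] => (-1 : Int)
            | [u] => u
            | _ => -2)) := by
  induction P using List.reverseRecOn with
  | nil =>
      simp [pvContrib]
  | append_singleton P q ih =>
      have hq := hP q (by simp)
      obtain ⟨hq0, hqn⟩ := hq
      have hP' : ∀ r ∈ P, 0 ≤ r.1 ∧ r.1.toNat < n := fun r hr => hP r (by simp [hr])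
      rw [List.foldl_append, List.foldl_cons, List.foldl_nil, ih hP']
      have hqk : q.1 = ((q.1.toNat : Nat) : Int) := (Int.toNat_of_nonneg hq0).symm
      have hget : PySem.List.pyGetD ((List.range n).map (fun (i : Nat) => ((pvContrib P (i : Int)).length : Int))) q.1 0
          = ((pvContrib P q.1).length : Int) := by
        rw [hqk, PySem.List.pyGetD_natCast]
        rw [List.getD_eq_getElem?_getD]
        simp [hqn]
      simp only [pvUpd]
      rw [hqk] at hget
      rw [hqk, hget]
      simp only [PySem.List.pySetD_natCast]
      rw [set_map_range _ _ _ _ hqn]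
      simp only [Prod.mk.injEq]
      constructor
      · apply List.map_congr_left
        intro i hi
        rw [List.mem_range] at hi
        rw [pvContrib_append]
        by_cases h : i = q.1.toNat
        · subst h
          rw [if_pos rfl, if_pos hqk]
          simp
        · rw [if_neg h, if_neg (by intro he; exact h (by omega))]
          simp
      · cases hc : pvContrib P ((q.1.toNat : Nat) : Int) with
        | nil =>
            rw [if_pos (by simp), set_map_range _ _ _ _ hqn]
            apply List.map_congr_left
            intro i hi
            rw [List.mem_range] at hi
            rw [pvContrib_append]
            by_cases h : i = q.1.toNat
            · subst h
              rw [if_pos rfl, if_pos hqk, hc]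
              simp
            · rw [if_neg h, if_neg (by intro he; exact h (by omega))]
              simp
        | cons a l =>
            rw [if_neg (by simp; omega), set_map_range _ _ _ _ hqn]
            apply List.map_congr_left
            intro i hi
            rw [List.mem_range] at hi
            rw [pvContrib_append]
            by_cases h : i = q.1.toNat
            · subst h
              rw [if_pos rfl, if_pos hqk, hc]
              cases l <;> simp
            · rw [if_neg h, if_neg (by intro he; exact h (by omega))]
              simp

-- ===== VERDICT (by name: the statement is the Claim_ definition above) =====
theorem build_selected_conflict_info_spec : Claim_equal_build_selected_conflict_info := by
  intro in_set adj _ hpre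
  unfold Spec_build_selected_conflict_info
  have hP : ∀ q ∈ pvPairs in_set adj, 0 ≤ q.1 ∧ q.1.toNat < adj.length := by
    intro q hq
    rw [pvPairs, List.mem_flatMap] at hq
    obtain ⟨p, hp, hqp⟩ := hq
    rw [PySem.List.mem_enumerate_iff] at hp
    obtain ⟨k, hk, rfl⟩ := hp
    by_cases hsel : in_set[k] = true
    · simp only [zero_add, hsel, if_true, List.mem_filterMap] at hqp
      obtain ⟨hult, hvs⟩ := hpre k hk (by rw [getElem!_pos in_set k hk]; exact hsel)
      obtain ⟨v, hv, hvq⟩ := hqp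
      rw [PySem.List.pyGetD_natCast, List.getD_eq_getElem _ _ hult] at hv
      have hv' : v ∈ adj[k]! := by rw [getElem!_pos adj k hult]; exact hv
      obtain ⟨h0, h1, h2⟩ := hvs v hv'
      by_cases hc : PySem.List.pyGetD in_set v true = true
      · rw [if_pos hc] at hvq; cases hvq
      · rw [if_neg hc] at hvq
        cases hvq
        refine ⟨h0, h2 ?_⟩
        rw [getElem!_pos in_set v.toNat h1]
        rw [PySem.List.pyGetD_eq_getElem in_set true h0 (by omega)] at hc
        simpa using hc
    · simp only [hsel] at hqp
      simp at hqp
  have hA : build_selected_conflict_info in_set adj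
      = (pvPairs in_set adj).foldl pvUpd (List.replicate adj.length 0, List.replicate adj.length (-1)) := by
    unfold build_selected_conflict_info pvPairs
    exact foldl_flat in_set adj _ _
  rw [hA, foldl_pvUpd adj.length _ hP]
  unfold build_selected_conflict_info_alt
  simp only [PySem.Dict.getD_foldl_modify_append, PySem.Dict.getD_empty, List.nil_append]
  rw [PySem.List.pyRange_zero_natCast]
  simp [List.map_map, pvContrib, Function.comp]
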